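-- pv_equiv track=rewrite | github.com/Facultad-Ikkot/IA-I | TP_4/main.py | diagonal_2
-- ===== SOURCE A (Python) =====
-- def diagonal_2(size, map, posX, posY):
--     cont = 0
--     posActX = posX
--     posActY = posY
--     while True:
--         posActX = posActX + 1
--         posActY = posActY - 1
--         if(posActX >= size or posActY <= 0):
--             break
--         if (map[posActX][posActY] == 1):
--             cont = cont+1
--     posActX = posX
--     posActY = posY
--     while True:
--         posActX = posActX - 1
--         posActY = posActY + 1
--         if(posActX <= 0 or posActY >= size):
--             break
--         if (map[posActX][posActY] == 1):
--             cont = cont+1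
--     return cont
-- ===== SOURCE B (Python) =====
-- def diagonal_2(size, map, posX, posY):
--     c = posX + posY
--     lo = max(1, c - size + 1)
--     hi = min(size - 1, c - 1)
--     cont = 0
--     for X in range(lo, hi + 1):
--         if X != posX and map[X][c - X] == 1:
--             cont += 1
--     return cont
-- ===== Notes on version B (the rewrite author's own statement) =====
-- stated objective: simpler
-- what changed: Replaces A's two outward pointer-walks from (posX,posY) (with separate asymmetric break conditions) by computing the constant diagonal sum c = posX+posY and doing one straight for-loop over X in [max(1,c-size+1), min(size-1,c-1)], skipping X == posX.
-- outside the precondition, e.g. on diagonal_2(2, [[0, 1], [1, 1]], -1, 2): A returns 1, B returns 0; on diagonal_2(4, [[0, 0, 0], [0, 0, 1]], -2, 3): A returns 1, B returns 0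
import Mathlib
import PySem

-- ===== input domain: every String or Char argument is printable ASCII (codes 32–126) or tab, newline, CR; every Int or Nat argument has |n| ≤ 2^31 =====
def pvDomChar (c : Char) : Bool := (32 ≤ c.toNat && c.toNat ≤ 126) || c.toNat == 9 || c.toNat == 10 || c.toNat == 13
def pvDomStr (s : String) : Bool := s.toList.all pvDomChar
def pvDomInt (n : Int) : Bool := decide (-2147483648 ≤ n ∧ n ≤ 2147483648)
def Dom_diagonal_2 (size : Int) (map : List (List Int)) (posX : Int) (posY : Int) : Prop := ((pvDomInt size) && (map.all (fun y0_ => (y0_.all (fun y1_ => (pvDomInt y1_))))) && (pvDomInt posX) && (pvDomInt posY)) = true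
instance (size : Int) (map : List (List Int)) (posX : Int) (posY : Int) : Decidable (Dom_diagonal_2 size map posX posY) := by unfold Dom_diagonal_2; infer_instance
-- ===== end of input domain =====

-- B replaces A's two outward pointer-walks along the anti-diagonal by a single
-- range scan over the diagonal's valid X-interval, skipping the start column (simpler decomposition, same cost).


-- shared cell accessor: map[x][y] (none = IndexError; Pre_ keeps all accesses in range)
def pvCell (m : List (List Int)) (x y : Int) : Option Int :=
  (PySem.List.pyGet? m x).bind (fun r => PySem.List.pyGet? r y)

-- ===== PORT A =====
-- first while-loop: walk down-right (x+1, y-1) until x >= size or y <= 0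
def pvLoopA1 (size : Int) (m : List (List Int)) (x y cont : Int) : Int :=
  if h : x + 1 ≥ size ∨ y - 1 ≤ 0 then cont
  else pvLoopA1 size m (x + 1) (y - 1)
        (if pvCell m (x + 1) (y - 1) = some 1 then cont + 1 else cont)
termination_by (size - x).toNat
decreasing_by omega

-- second while-loop: walk up-left (x-1, y+1) until x <= 0 or y >= size
def pvLoopA2 (size : Int) (m : List (List Int)) (x y cont : Int) : Int :=
  if h : x - 1 ≤ 0 ∨ y + 1 ≥ size then cont
  else pvLoopA2 size m (x - 1) (y + 1)
        (if pvCell m (x - 1) (y + 1) = some 1 then cont + 1 else cont)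
termination_by x.toNat
decreasing_by omega

def diagonal_2 (size : Int) (map : List (List Int)) (posX : Int) (posY : Int) : Int :=
  pvLoopA2 size map posX posY (pvLoopA1 size map posX posY 0)

-- ===== PORT B =====
def diagonal_2_alt (size : Int) (map : List (List Int)) (posX : Int) (posY : Int) : Int :=
  let c := posX + posY
  let lo := max 1 (c - size + 1)
  let hi := min (size - 1) (c - 1)
  (PySem.List.pyRange lo (hi + 1) 1).foldl
    (fun cont X => if X ≠ posX ∧ pvCell map X (c - X) = some 1 then cont + 1 else cont) 0

-- ===== PRECONDITION & SPEC =====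
-- Pre_ = either (posX,posY) is a cell of a grid of at least size×size (the natural domain,
-- where every access is in range), or the start position makes both of A's walks stop
-- immediately (no cell is ever read, any map is fine).  It excludes positions off the
-- grid on which A happens to return via reads at other indices — cites in claim.json.
def Pre_diagonal_2 (size : Int) (map : List (List Int)) (posX : Int) (posY : Int) : Prop :=
  (size ≤ (map.length : Int) ∧ (∀ r ∈ map, size ≤ (r.length : Int)) ∧
    0 ≤ posX ∧ posX < size ∧ 0 ≤ posY ∧ posY < size)
  ∨ ((posX + 1 ≥ size ∨ posY ≤ 1) ∧ (posX ≤ 1 ∨ posY + 1 ≥ size))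
instance (size : Int) (map : List (List Int)) (posX : Int) (posY : Int) : Decidable (Pre_diagonal_2 size map posX posY) := by unfold Pre_diagonal_2; infer_instance

def pvWitness_diagonal_2 : Int × List (List Int) × Int × Int := (3, [[1,0,1],[0,1,1],[1,1,0]], 1, 1)

def Spec_diagonal_2 (size : Int) (map : List (List Int)) (posX : Int) (posY : Int) (out : Int) : Prop := out = diagonal_2_alt size map posX posY
instance (size : Int) (map : List (List Int)) (posX : Int) (posY : Int) (out : Int) : Decidable (Spec_diagonal_2 size map posX posY out) := by unfold Spec_diagonal_2; infer_instance

-- ===== CLAIM (what is proved, stated in full; the proofs are below) =====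
def Claim_equal_diagonal_2 : Prop := ∀ (size : Int) (map : List (List Int)) (posX : Int) (posY : Int), Dom_diagonal_2 size map posX posY → Pre_diagonal_2 size map posX posY → Spec_diagonal_2 size map posX posY (diagonal_2 size map posX posY)

-- ===== LEMMAS AND PROOFS =====

-- 0/1 indicator of a hit at column X on diagonal c
def pvInd (m : List (List Int)) (c X : Int) : Int :=
  if pvCell m X (c - X) = some 1 then 1 else 0

-- number of hits for X in [a, b)
def pvCnt (m : List (List Int)) (c a b : Int) : Int :=
  if _h : a < b then pvInd m c a + pvCnt m c (a + 1) b else 0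
termination_by (b - a).toNat
decreasing_by omega

-- same, but skipping column p
def pvCntSkip (p : Int) (m : List (List Int)) (c a b : Int) : Int :=
  if _h : a < b then (if a ≠ p ∧ pvCell m a (c - a) = some 1 then 1 else 0) + pvCntSkip p m c (a + 1) b
  else 0
termination_by (b - a).toNat
decreasing_by omega

theorem pvCnt_nil (m : List (List Int)) (c a b : Int) (h : b ≤ a) : pvCnt m c a b = 0 := by
  unfold pvCnt; rw [dif_neg (by omega)]

theorem pvCnt_cons (m : List (List Int)) (c a b : Int) (h : a < b) :
    pvCnt m c a b = pvInd m c a + pvCnt m c (a + 1) b := by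
  conv_lhs => unfold pvCnt
  rw [dif_pos h]

theorem pvCnt_snoc (m : List (List Int)) (c : Int) : ∀ (n : Nat) (a b : Int), (b - a).toNat = n → a ≤ b →
    pvCnt m c a (b + 1) = pvCnt m c a b + pvInd m c b := by
  intro n
  induction n with
  | zero =>
    intro a b hn hab
    have hab' : a = b := by omega
    subst hab'
    rw [pvCnt_cons m c a (a+1) (by omega), pvCnt_nil m c (a+1) (a+1) le_rfl,
        pvCnt_nil m c a a le_rfl]
    ring
  | succ k ih =>
    intro a b hn hab
    have h1 : a < b := by omega
    rw [pvCnt_cons m c a (b+1) (by omega), pvCnt_cons m c a b h1,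
        ih (a+1) b (by omega) (by omega)]
    ring

theorem pvLoopA1_eq (size : Int) (m : List (List Int)) (c : Int) :
    ∀ (n : Nat) (x cont : Int), (size - x).toNat = n →
      pvLoopA1 size m x (c - x) cont = cont + pvCnt m c (x + 1) (min size c) := by
  intro n
  induction n with
  | zero =>
    intro x cont hn
    unfold pvLoopA1
    rw [dif_pos (by omega), pvCnt_nil m c (x+1) (min size c) (by omega)]
    ring
  | succ k ih =>
    intro x cont hn
    unfold pvLoopA1
    by_cases hb : x + 1 ≥ size ∨ c - x - 1 ≤ 0
    · rw [dif_pos hb, pvCnt_nil m c (x+1) (min size c) (by omega)]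
      ring
    · rw [dif_neg hb]
      push Not at hb
      have hx : c - x - 1 = c - (x + 1) := by ring
      rw [hx, ih (x+1) _ (by omega), pvCnt_cons m c (x+1) (min size c) (by omega)]
      unfold pvInd
      split_ifs <;> ring

theorem pvLoopA2_eq (size : Int) (m : List (List Int)) (c : Int) :
    ∀ (n : Nat) (x cont : Int), x.toNat = n →
      pvLoopA2 size m x (c - x) cont = cont + pvCnt m c (max 1 (c - size + 1)) x := by
  intro n
  induction n with
  | zero =>
    intro x cont hn
    unfold pvLoopA2
    rw [dif_pos (by omega), pvCnt_nil m c (max 1 (c - size + 1)) x (by omega)]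
    ring
  | succ k ih =>
    intro x cont hn
    unfold pvLoopA2
    by_cases hb : x - 1 ≤ 0 ∨ c - x + 1 ≥ size
    · rw [dif_pos hb, pvCnt_nil m c (max 1 (c - size + 1)) x (by omega)]
      ring
    · rw [dif_neg hb]
      push Not at hb
      have hx : c - x + 1 = c - (x - 1) := by ring
      have hsn := pvCnt_snoc m c (x - 1 - max 1 (c - size + 1)).toNat (max 1 (c - size + 1)) (x-1) rfl (by omega)
      rw [show x - 1 + 1 = x by ring] at hsn
      rw [hx, ih (x-1) _ (by omega), hsn]
      unfold pvInd
      rw [show c - (x - 1) = c - x + 1 by ring]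
      split_ifs <;> ring

theorem pvFoldB_eq (p : Int) (m : List (List Int)) (c : Int) :
    ∀ (n : Nat) (a b acc : Int), (b - a).toNat = n →
      (PySem.List.pyRange a b 1).foldl
        (fun cont X => if X ≠ p ∧ pvCell m X (c - X) = some 1 then cont + 1 else cont) acc
      = acc + pvCntSkip p m c a b := by
  intro n
  induction n with
  | zero =>
    intro a b acc hn
    rw [PySem.List.pyRange_one_eq_nil (by omega)]
    unfold pvCntSkip
    rw [dif_neg (by omega)]
    simp
  | succ k ih =>
    intro a b acc hn
    have hab : a < b := by omega
    rw [PySem.List.pyRange_one_cons hab]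
    simp only [List.foldl_cons]
    rw [ih (a+1) b _ (by omega)]
    conv_rhs => unfold pvCntSkip
    rw [dif_pos hab]
    split_ifs <;> ring

theorem pvCntSkip_out (m : List (List Int)) (c p : Int) :
    ∀ (n : Nat) (a b : Int), (b - a).toNat = n → p < a →
      pvCntSkip p m c a b = pvCnt m c a b := by
  intro n
  induction n with
  | zero =>
    intro a b hn hp
    unfold pvCntSkip
    rw [dif_neg (by omega), pvCnt_nil m c a b (by omega)]
  | succ k ih =>
    intro a b hn hp
    have hab : a < b := by omega
    unfold pvCntSkip
    rw [dif_pos hab, ih (a+1) b (by omega) (by omega), pvCnt_cons m c a b hab]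
    unfold pvInd
    have hne : a ≠ p := by omega
    simp [hne]

theorem pvCntSkip_split (m : List (List Int)) (c p : Int) :
    ∀ (n : Nat) (a b : Int), (b - a).toNat = n → a - 1 ≤ p → p ≤ b →
      pvCntSkip p m c a b = pvCnt m c a p + pvCnt m c (p + 1) b := by
  intro n
  induction n with
  | zero =>
    intro a b hn h1 h2
    unfold pvCntSkip
    rw [dif_neg (by omega), pvCnt_nil m c a p (by omega), pvCnt_nil m c (p+1) b (by omega)]
    ring
  | succ k ih =>
    intro a b hn h1 h2
    have hab : a < b := by omega
    by_cases hlt : p < a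
    · -- p = a - 1: nothing is skipped
      have hpa : p + 1 = a := by omega
      rw [pvCntSkip_out m c p (b - a).toNat a b rfl hlt,
          pvCnt_nil m c a p (by omega), ← hpa]
      ring
    · unfold pvCntSkip
      rw [dif_pos hab]
      by_cases hap : a = p
      · subst hap
        rw [pvCntSkip_out m c a (b - (a+1)).toNat (a+1) b rfl (by omega),
            pvCnt_nil m c a a le_rfl]
        simp
      · -- a < p
        rw [ih (a+1) b (by omega) (by omega) h2,
            pvCnt_cons m c a p (by omega)]
        unfold pvInd
        simp only [ne_eq, hap, not_false_iff, true_and]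
        split_ifs <;> ring

-- ===== VERDICT (by name: the statement is the Claim_ definition above) =====
theorem pvCntSkip_nil (p : Int) (m : List (List Int)) (c a b : Int) (h : b ≤ a) :
    pvCntSkip p m c a b = 0 := by
  unfold pvCntSkip; rw [dif_neg (by omega)]

theorem diagonal_2_spec : Claim_equal_diagonal_2 := by
  intro size m posX posY _ hpre
  unfold Spec_diagonal_2 diagonal_2 diagonal_2_alt
  set c := posX + posY with hc
  rw [pvFoldB_eq posX m c (min (size - 1) (c - 1) + 1 - max 1 (c - size + 1)).toNat
        (max 1 (c - size + 1)) (min (size - 1) (c - 1) + 1) 0 rfl]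
  rcases hpre with ⟨hlen, hrows, hx0, hx1, hy0, hy1⟩ | ⟨h1, h2⟩
  · -- the position is a cell of the grid: both sides count the same diagonal interval
    have hA1 : pvLoopA1 size m posX posY 0 = 0 + pvCnt m c (posX + 1) (min size c) := by
      have := pvLoopA1_eq size m c (size - posX).toNat posX 0 rfl
      rwa [show c - posX = posY by omega] at this
    have hA2 : pvLoopA2 size m posX posY (pvLoopA1 size m posX posY 0)
        = (0 + pvCnt m c (posX + 1) (min size c)) + pvCnt m c (max 1 (c - size + 1)) posX := by
      have := pvLoopA2_eq size m c posX.toNat posX (pvLoopA1 size m posX posY 0) rfl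
      rw [show c - posX = posY by omega] at this
      rw [this, hA1]
    rw [hA2]
    rw [show min (size - 1) (c - 1) + 1 = min size c by omega]
    rw [pvCntSkip_split m c posX (min size c - max 1 (c - size + 1)).toNat
          (max 1 (c - size + 1)) (min size c) rfl (by omega) (by omega)]
    ring
  · -- both of A's walks break immediately; B's interval is empty or the single skipped column
    unfold pvLoopA2
    rw [dif_pos (by omega)]
    unfold pvLoopA1
    rw [dif_pos (by omega)]
    by_cases hle : min (size - 1) (c - 1) + 1 ≤ max 1 (c - size + 1)
    · rw [pvCntSkip_nil posX m c _ _ hle]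
      ring
    · have hlo : max 1 (c - size + 1) = posX := by omega
      have hhi : min (size - 1) (c - 1) + 1 = posX + 1 := by omega
      rw [hlo, hhi]
      unfold pvCntSkip
      rw [dif_pos (by omega), pvCntSkip_nil posX m c (posX + 1) (posX + 1) le_rfl]
      simp
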